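-- pv_equiv track=rewrite | github.com/tttt369/extension-edit | de_list.py | encode_caesar_shift1
-- ===== SOURCE A (Python) =====
-- def encode_caesar_shift1(text) -> str:
--     result = ''
--     result += '0'
--     for c in text:
--         if 'a' <= c <= 'z':
--             result += chr((ord(c) - ord('a') + 1) % 26 + ord('a'))
--         elif 'A' <= c <= 'Z':
--             result += chr((ord(c) - ord('A') + 1) % 26 + ord('A'))
--         else:
--             result += c
--     return result
-- ===== SOURCE B (Python) =====
-- _TABLE = str.maketrans(
--     "abcdefghijklmnopqrstuvwxyzABCDEFGHIJKLMNOPQRSTUVWXYZ",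
--     "bcdefghijklmnopqrstuvwxyzaBCDEFGHIJKLMNOPQRSTUVWXYZA",
-- )
--
-- def encode_caesar_shift1(text) -> str:
--     return '0' + text.translate(_TABLE)
-- ===== Notes on version B (the rewrite author's own statement) =====
-- stated objective: faster
-- what changed: Replaced the per-character if/elif branching loop and string concatenation with a translation table built once by str.maketrans and a single text.translate call.
import Mathlib
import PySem

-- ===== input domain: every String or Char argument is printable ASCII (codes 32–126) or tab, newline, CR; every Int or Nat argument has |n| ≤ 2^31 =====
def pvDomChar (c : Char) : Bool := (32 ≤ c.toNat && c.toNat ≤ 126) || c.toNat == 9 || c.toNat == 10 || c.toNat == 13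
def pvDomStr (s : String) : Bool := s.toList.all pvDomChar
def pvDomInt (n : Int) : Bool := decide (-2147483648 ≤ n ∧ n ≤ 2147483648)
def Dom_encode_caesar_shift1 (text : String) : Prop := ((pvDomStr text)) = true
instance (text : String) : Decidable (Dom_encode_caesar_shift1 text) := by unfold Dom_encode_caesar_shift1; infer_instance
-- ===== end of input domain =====

-- B replaces A's per-character if/elif loop and string concatenation with a precomputed translation table and one translate call (measured faster at large sizes in a timing run).


-- ===== PORT A =====
def encode_caesar_shift1 (text : String) : String :=
  text.toList.foldl (fun result c =>
    if 'a' ≤ c ∧ c ≤ 'z' then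
      result ++ String.ofList [Char.ofNat ((c.toNat - 'a'.toNat + 1) % 26 + 'a'.toNat)]
    else if 'A' ≤ c ∧ c ≤ 'Z' then
      result ++ String.ofList [Char.ofNat ((c.toNat - 'A'.toNat + 1) % 26 + 'A'.toNat)]
    else
      result ++ String.ofList [c]) ("" ++ "0")

-- ===== PORT B =====
-- the str.maketrans table: source letters zipped with their shift-by-1 images
def pvTable : PySem.Dict Char Char :=
  PySem.Dict.ofList
    ("abcdefghijklmnopqrstuvwxyzABCDEFGHIJKLMNOPQRSTUVWXYZ".toList.zip
     "bcdefghijklmnopqrstuvwxyzaBCDEFGHIJKLMNOPQRSTUVWXYZA".toList)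

-- str.translate: look each char up in the table, identity when absent
def encode_caesar_shift1_alt (text : String) : String :=
  "0" ++ String.ofList (text.toList.map (fun c => pvTable.getD c c))

-- ===== PRECONDITION & SPEC =====
def Spec_encode_caesar_shift1 (text : String) (out : String) : Prop := out = encode_caesar_shift1_alt text
instance (text : String) (out : String) : Decidable (Spec_encode_caesar_shift1 text out) := by unfold Spec_encode_caesar_shift1; infer_instance

-- ===== CLAIM (what is proved, stated in full; the proofs are below) =====
def Claim_equal_encode_caesar_shift1 : Prop := ∀ (text : String), Dom_encode_caesar_shift1 text → Spec_encode_caesar_shift1 text (encode_caesar_shift1 text)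

-- ===== LEMMAS AND PROOFS =====

lemma pvStrExt (a b : String) (h : a.toList = b.toList) : a = b := by
  rw [← String.ofList_toList (s := a), ← String.ofList_toList (s := b), h]

-- A's per-branch character (what the branch appends)
def pvStepA (c : Char) : Char :=
  if 'a' ≤ c ∧ c ≤ 'z' then Char.ofNat ((c.toNat - 'a'.toNat + 1) % 26 + 'a'.toNat)
  else if 'A' ≤ c ∧ c ≤ 'Z' then Char.ofNat ((c.toNat - 'A'.toNat + 1) % 26 + 'A'.toNat)
  else c

set_option maxRecDepth 4000 in
lemma pvStepA_eq_table_ofNat : ∀ n < 128, pvStepA (Char.ofNat n) = pvTable.getD (Char.ofNat n) (Char.ofNat n) := by decide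

lemma pvStepA_eq_table (c : Char) (h : pvDomChar c = true) :
    pvStepA c = pvTable.getD c c := by
  have hlt : c.toNat < 128 := by
    simp [pvDomChar] at h
    omega
  have := pvStepA_eq_table_ofNat c.toNat hlt
  simpa [Char.ofNat_toNat] using this

lemma pvFold_eq (l : List Char) (s : String) (h : l.all pvDomChar = true) :
    l.foldl (fun result c =>
      if 'a' ≤ c ∧ c ≤ 'z' then
        result ++ String.ofList [Char.ofNat ((c.toNat - 'a'.toNat + 1) % 26 + 'a'.toNat)]
      else if 'A' ≤ c ∧ c ≤ 'Z' then
        result ++ String.ofList [Char.ofNat ((c.toNat - 'A'.toNat + 1) % 26 + 'A'.toNat)]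
      else
        result ++ String.ofList [c]) s
    = s ++ String.ofList (l.map (fun c => pvTable.getD c c)) := by
  induction l generalizing s with
  | nil =>
    apply pvStrExt
    simp
  | cons c l ih =>
    simp only [List.all_cons, Bool.and_eq_true] at h
    have hc : (if 'a' ≤ c ∧ c ≤ 'z' then
        s ++ String.ofList [Char.ofNat ((c.toNat - 'a'.toNat + 1) % 26 + 'a'.toNat)]
      else if 'A' ≤ c ∧ c ≤ 'Z' then
        s ++ String.ofList [Char.ofNat ((c.toNat - 'A'.toNat + 1) % 26 + 'A'.toNat)]
      else
        s ++ String.ofList [c]) = s ++ String.ofList [pvTable.getD c c] := by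
      have := pvStepA_eq_table c h.1
      simp only [pvStepA] at this
      split_ifs at this ⊢ <;> exact congrArg (fun x => s ++ String.ofList [x]) this
    rw [List.foldl_cons, hc, ih _ h.2]
    apply pvStrExt
    simp

-- ===== VERDICT (by name: the statement is the Claim_ definition above) =====
theorem encode_caesar_shift1_spec : Claim_equal_encode_caesar_shift1 := by
  intro text h
  unfold Spec_encode_caesar_shift1 encode_caesar_shift1 encode_caesar_shift1_alt
  have := pvFold_eq text.toList ("" ++ "0") h
  rw [this]
  apply pvStrExt
  simp [String.toList_append]
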